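-- pv_equiv track=rewrite | github.com/andreadecarlo/ADVML-das | scripts/generate_multiplication_dataset.py | compute_write_down_values
-- ===== SOURCE A (Python) =====
-- from typing import List, Tuple, Dict
--
-- def compute_write_down_values(x_digits: List[int], k: int) -> List[int]:
--     """
--     Compute the write-down values for a number x_digits (as list of digits) and multiplier k.
--
--     Args:
--         x_digits: List of digits, least significant first (e.g., [3, 2, 1] for 123)
--         k: Multiplier (single digit)
--
--     Returns:
--         List of write-down values for each step, where index 0 = ones place, index 1 = tens place, etc.
--     """
--     write_down_values = []
--     carry = 0
--     for d in x_digits: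
--         prod = d * k + carry
--         residual = prod % 10
--         carry = prod // 10
--         write_down_values.append(residual)
--     return write_down_values
-- ===== SOURCE B (Python) =====
-- def compute_write_down_values(x_digits, k):
--     x = 0
--     for d in reversed(x_digits):
--         x = x * 10 + d
--     p = x * k
--     result = []
--     for _ in range(len(x_digits)):
--         p, r = divmod(p, 10)
--         result.append(r)
--     return result
-- ===== Notes on version B (the rewrite author's own statement) =====
-- stated objective: alternative
-- what changed: Replaces the per-digit carry loop by whole-number arithmetic: B reconstructs the integer from the digit list (Horner), multiplies it by k once, then peels the output digits off the product with repeated divmod; no carry variable and no per-digit multiplication by k.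
import Mathlib
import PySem

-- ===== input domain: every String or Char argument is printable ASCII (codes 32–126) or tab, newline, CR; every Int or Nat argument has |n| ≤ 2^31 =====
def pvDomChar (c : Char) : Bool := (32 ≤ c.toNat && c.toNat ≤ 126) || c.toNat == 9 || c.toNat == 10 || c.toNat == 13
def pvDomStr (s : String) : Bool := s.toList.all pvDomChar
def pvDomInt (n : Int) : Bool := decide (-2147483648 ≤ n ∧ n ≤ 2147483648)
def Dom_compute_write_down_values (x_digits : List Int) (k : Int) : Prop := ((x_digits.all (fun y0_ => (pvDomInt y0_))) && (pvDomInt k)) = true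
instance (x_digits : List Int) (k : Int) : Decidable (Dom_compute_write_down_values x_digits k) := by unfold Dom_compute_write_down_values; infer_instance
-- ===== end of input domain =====

-- B replaces A's sequential carry loop by one whole-number multiplication followed by
-- positional digit extraction (alternative decomposition; no carry state).

-- ===== PORT A =====
-- Literal port of A: one pass with an accumulator list and a carry.
def compute_write_down_values (x_digits : List Int) (k : Int) : List Int :=
  (x_digits.foldl
    (fun (st : List Int × Int) d =>
      let prod := d * k + st.2
      (st.1 ++ [PySem.Int.mod prod 10], PySem.Int.floordiv prod 10))
    (([] : List Int), (0 : Int))).1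

-- ===== PORT B =====
-- Literal port of B: Horner reconstruction x of the number, p = x * k, then
-- len(x_digits) rounds of divmod(p, 10) appending each remainder.
def compute_write_down_values_alt (x_digits : List Int) (k : Int) : List Int :=
  let x := x_digits.reverse.foldl (fun acc d => acc * 10 + d) 0
  let p := x * k
  ((List.range x_digits.length).foldl
    (fun (st : Int × List Int) _ =>
      (PySem.Int.floordiv st.1 10, st.2 ++ [PySem.Int.mod st.1 10]))
    (p, ([] : List Int))).2

-- ===== PRECONDITION & SPEC =====
def Spec_compute_write_down_values (x_digits : List Int) (k : Int) (out : List Int) : Prop := out = compute_write_down_values_alt x_digits k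
instance (x_digits : List Int) (k : Int) (out : List Int) : Decidable (Spec_compute_write_down_values x_digits k out) := by unfold Spec_compute_write_down_values; infer_instance

-- ===== CLAIM (what is proved, stated in full; the proofs are below) =====
def Claim_equal_compute_write_down_values : Prop := ∀ (x_digits : List Int) (k : Int), Dom_compute_write_down_values x_digits k → Spec_compute_write_down_values x_digits k (compute_write_down_values x_digits k)

-- ===== LEMMAS AND PROOFS =====

-- Place value of a digit list (least significant first), with offset n.
def pvS (l : List Int) (n : Nat) : Int :=
  ((l.zipIdx n).map (fun di => di.1 * 10 ^ di.2)).sum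

theorem pvS_shift (l : List Int) : ∀ n, pvS l (n + 1) = 10 * pvS l n := by
  induction l with
  | nil => intro n; simp [pvS]
  | cons d rest ih =>
    intro n
    have h1 : pvS (d :: rest) (n + 1) = d * 10 ^ (n + 1) + pvS rest (n + 2) := by
      simp [pvS, List.zipIdx_cons]
    have h2 : pvS (d :: rest) n = d * 10 ^ n + pvS rest (n + 1) := by
      simp [pvS, List.zipIdx_cons]
    rw [h1, h2, show n + 2 = (n + 1) + 1 from rfl, ih, ih, pow_succ]
    ring

theorem pvS_cons (d : Int) (rest : List Int) : pvS (d :: rest) 0 = d + 10 * pvS rest 0 := by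
  have h : pvS (d :: rest) 0 = d * 10 ^ 0 + pvS rest 1 := by
    simp [pvS, List.zipIdx_cons]
  rw [h, show (1 : Nat) = 0 + 1 from rfl, pvS_shift]
  ring

theorem step_div (a b : Int) (i : Nat) :
    (a + 10 * b) / 10 ^ (i + 1) = (a / 10 + b) / 10 ^ i := by
  rw [pow_succ', ← Int.ediv_ediv_of_nonneg (by norm_num : (0:ℤ) ≤ 10),
      Int.add_mul_ediv_left a b (by norm_num : (10:ℤ) ≠ 0)]

theorem foldA (k : Int) (l : List Int) : ∀ (c : Int) (acc : List Int),
    (l.foldl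
      (fun (st : List Int × Int) d =>
        let prod := d * k + st.2
        (st.1 ++ [PySem.Int.mod prod 10], PySem.Int.floordiv prod 10))
      (acc, c)).1
    = acc ++ (List.range l.length).map
        (fun i => (((pvS l 0) * k + c) / 10 ^ i) % 10) := by
  induction l with
  | nil => intro c acc; simp
  | cons d rest ih =>
    intro c acc
    simp only [List.foldl_cons]
    rw [ih]
    have hS : pvS (d :: rest) 0 * k + c = (d * k + c) + 10 * (pvS rest 0 * k) := by
      rw [pvS_cons]; ring
    have hmod : PySem.Int.mod (d * k + c) 10 = (d * k + c) % 10 :=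
      PySem.Int.mod_eq_emod_of_pos (by norm_num)
    have hdiv : PySem.Int.floordiv (d * k + c) 10 = (d * k + c) / 10 :=
      PySem.Int.floordiv_eq_ediv_of_pos (by norm_num)
    rw [hmod, hdiv, List.length_cons, List.range_succ_eq_map, List.map_cons, List.map_map,
        List.append_assoc, List.singleton_append]
    congr 1
    congr 1
    · rw [hS, pow_zero, Int.ediv_one, Int.add_mul_emod_self_left]
    · apply List.map_congr_left
      intro i _
      simp only [Function.comp_apply]
      rw [hS, step_div]
      ring_nf

-- Horner reconstruction equals the place-value sum.
theorem horner_eq_pvS (l : List Int) :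
    l.reverse.foldl (fun acc d => acc * 10 + d) 0 = pvS l 0 := by
  rw [List.foldl_reverse]
  induction l with
  | nil => simp [pvS]
  | cons d rest ih => rw [List.foldr_cons, ih, pvS_cons]; ring

-- The divmod-peeling loop produces the positional digits of p.
theorem foldB (l : List Nat) : ∀ (p : Int) (acc : List Int),
    (l.foldl
      (fun (st : Int × List Int) _ =>
        (PySem.Int.floordiv st.1 10, st.2 ++ [PySem.Int.mod st.1 10]))
      (p, acc)).2
    = acc ++ (List.range l.length).map (fun i => (p / 10 ^ i) % 10) := by
  induction l with
  | nil => intro p acc; simp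
  | cons _ rest ih =>
    intro p acc
    simp only [List.foldl_cons]
    rw [ih, PySem.Int.mod_eq_emod_of_pos (by norm_num),
        PySem.Int.floordiv_eq_ediv_of_pos (by norm_num),
        List.length_cons, List.range_succ_eq_map, List.map_cons, List.map_map,
        List.append_assoc, List.singleton_append]
    congr 1
    congr 1
    · rw [pow_zero, Int.ediv_one]
    · apply List.map_congr_left
      intro i _
      simp only [Function.comp_apply]
      rw [pow_succ', ← Int.ediv_ediv_of_nonneg (by norm_num : (0:ℤ) ≤ 10)]

-- ===== VERDICT (by name: the statement is the Claim_ definition above) =====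
theorem compute_write_down_values_spec : Claim_equal_compute_write_down_values := by
  intro x_digits k _
  unfold Spec_compute_write_down_values compute_write_down_values compute_write_down_values_alt
  rw [foldA, foldB, horner_eq_pvS]
  simp only [List.nil_append, List.length_range, add_zero]
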